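-- pv_equiv track=rewrite | github.com/chingsley/6314_ml_project_sample_collection | EnergySmells_Verified/OverUseOfLoops/augmented/count_abc_substrings/smelly_count_abc_substrings.py | count_abc_substrings
-- ===== SOURCE A (Python) =====
-- def count_abc_substrings(s):
--     # Counts how many times "abc" appears as a subsequence
--     count = 0
--     for i in range(len(s)):
--         for j in range(i + 1, len(s)):
--             for k in range(j + 1, len(s)):
--                 if s[i] == "a" and s[j] == "b" and s[k] == "c":
--                     count += 1
--     return count
-- ===== SOURCE B (Python) =====
-- def count_abc_substrings(s):
--     # Counts how many times "abc" appears as a subsequence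
--     a = 0
--     ab = 0
--     abc = 0
--     for ch in s:
--         if ch == "a":
--             a += 1
--         elif ch == "b":
--             ab += a
--         elif ch == "c":
--             abc += ab
--     return abc
-- ===== Notes on version B (the rewrite author's own statement) =====
-- stated objective: faster
-- what changed: Replaced the triple nested index loop over all i<j<k with a single left-to-right pass maintaining running counts of 'a', 'ab' and 'abc' subsequences.
import Mathlib
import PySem

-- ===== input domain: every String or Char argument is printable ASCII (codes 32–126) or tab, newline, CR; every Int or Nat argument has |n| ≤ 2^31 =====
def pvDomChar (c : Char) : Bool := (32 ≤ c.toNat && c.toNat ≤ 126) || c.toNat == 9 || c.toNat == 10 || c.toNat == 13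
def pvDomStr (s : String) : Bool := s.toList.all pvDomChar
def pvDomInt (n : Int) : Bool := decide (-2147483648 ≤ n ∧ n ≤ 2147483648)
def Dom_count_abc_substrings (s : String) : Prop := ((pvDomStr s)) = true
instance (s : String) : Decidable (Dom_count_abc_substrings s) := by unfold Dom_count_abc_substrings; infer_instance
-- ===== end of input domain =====

-- B replaces A's cubic triple index loop by one left-to-right pass keeping running counts of 'a', 'ab', 'abc' subsequences (objective: faster).

-- ===== PORT A =====
def count_abc_substrings (s : String) : Int :=
  (PySem.List.pyRange 0 (PySem.Str.len s) 1).foldl (fun count i =>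
    (PySem.List.pyRange (i + 1) (PySem.Str.len s) 1).foldl (fun count j =>
      (PySem.List.pyRange (j + 1) (PySem.Str.len s) 1).foldl (fun count k =>
        if PySem.Str.pyGet? s i = some 'a' ∧ PySem.Str.pyGet? s j = some 'b' ∧
           PySem.Str.pyGet? s k = some 'c' then count + 1 else count) count) count) 0

-- ===== PORT B =====
def count_abc_substrings_alt (s : String) : Int :=
  (s.toList.foldl (fun (st : Int × Int × Int) ch =>
    if ch = 'a' then (st.1 + 1, st.2.1, st.2.2)
    else if ch = 'b' then (st.1, st.2.1 + st.1, st.2.2)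
    else if ch = 'c' then (st.1, st.2.1, st.2.2 + st.2.1)
    else st) (0, 0, 0)).2.2

-- ===== PRECONDITION & SPEC =====
def Spec_count_abc_substrings (s : String) (out : Int) : Prop := out = count_abc_substrings_alt s
instance (s : String) (out : Int) : Decidable (Spec_count_abc_substrings s out) := by unfold Spec_count_abc_substrings; infer_instance

-- ===== CLAIM (what is proved, stated in full; the proofs are below) =====
def Claim_equal_count_abc_substrings : Prop := ∀ (s : String), Dom_count_abc_substrings s → Spec_count_abc_substrings s (count_abc_substrings s)

-- ===== LEMMAS AND PROOFS =====

-- reference counting functions (proof-side only)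
def cntA : List Char → Int
  | [] => 0
  | ch :: t => (if ch = 'a' then 1 else 0) + cntA t

def cntB : List Char → Int
  | [] => 0
  | ch :: t => (if ch = 'b' then 1 else 0) + cntB t

def cntC : List Char → Int
  | [] => 0
  | ch :: t => (if ch = 'c' then 1 else 0) + cntC t

def abP : List Char → Int
  | [] => 0
  | ch :: t => (if ch = 'a' then cntB t else 0) + abP t

def bcP : List Char → Int
  | [] => 0
  | ch :: t => (if ch = 'b' then cntC t else 0) + bcP t

def abcT : List Char → Int
  | [] => 0
  | ch :: t => (if ch = 'a' then bcP t else 0) + abcT t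

-- innermost loop of A: counts 'c' in the suffix
theorem Lk (l : List Char) : ∀ (suf pre : List Char), l = pre ++ suf → ∀ c0 : Int,
    (PySem.List.pyRange (pre.length : Int) (l.length : Int) 1).foldl
      (fun c k => if PySem.List.pyGet? l k = some 'c' then c + 1 else c) c0
    = c0 + cntC suf := by
  intro suf
  induction suf with
  | nil =>
    intro pre h c0
    subst h
    simp [PySem.List.pyRange_one_eq_nil, cntC]
  | cons ch t ih =>
    intro pre h c0
    have hlen : l.length = pre.length + (t.length + 1) := by
      subst h; simp [List.length_append]
    rw [PySem.List.pyRange_one_cons (by exact_mod_cast (by omega : pre.length < l.length))]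
    simp only [List.foldl_cons]
    have hg : PySem.List.pyGet? l (pre.length : Int) = some ch := by
      rw [h]; exact PySem.List.pyGet?_append_length pre t ch
    have h' : l = (pre ++ [ch]) ++ t := by simp [h]
    have hcast : ((pre.length : Int) + 1) = ((pre ++ [ch]).length : Int) := by simp
    rw [hg, hcast, ih (pre ++ [ch]) h']
    by_cases hch : ch = 'c'
    · simp [hch, cntC]; ring
    · simp [hch, cntC]

-- middle loop of A (after the i-test is discharged): counts b·c pairs in the suffix
theorem Lj (l : List Char) : ∀ (suf pre : List Char), l = pre ++ suf → ∀ c0 : Int,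
    (PySem.List.pyRange (pre.length : Int) (l.length : Int) 1).foldl
      (fun c j => (PySem.List.pyRange (j + 1) (l.length : Int) 1).foldl
        (fun c k => if PySem.List.pyGet? l j = some 'b' ∧ PySem.List.pyGet? l k = some 'c'
          then c + 1 else c) c) c0
    = c0 + bcP suf := by
  intro suf
  induction suf with
  | nil =>
    intro pre h c0
    subst h
    simp [PySem.List.pyRange_one_eq_nil, bcP]
  | cons ch t ih =>
    intro pre h c0
    have hlen : l.length = pre.length + (t.length + 1) := by
      subst h; simp [List.length_append]
    rw [PySem.List.pyRange_one_cons (by exact_mod_cast (by omega : pre.length < l.length))]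
    simp only [List.foldl_cons]
    have hg : PySem.List.pyGet? l (pre.length : Int) = some ch := by
      rw [h]; exact PySem.List.pyGet?_append_length pre t ch
    have h' : l = (pre ++ [ch]) ++ t := by simp [h]
    have hcast : ((pre.length : Int) + 1) = ((pre ++ [ch]).length : Int) := by simp
    rw [hg]
    by_cases hch : ch = 'b'
    · simp only [hch, true_and]
      rw [hcast, Lk l t (pre ++ [ch]) h', ih (pre ++ [ch]) h']
      simp [bcP]
      ring
    · have hz : ∀ c : Int, (PySem.List.pyRange ((pre.length : Int) + 1) (l.length : Int) 1).foldl
        (fun c k => if some ch = some 'b' ∧ PySem.List.pyGet? l k = some 'c' then c + 1 else c) c = c := by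
        intro c
        refine (PySem.List.foldl_congr_mem _ _ (fun c _ => c) c ?_).trans (List.foldl_fixed _)
        intro acc x _
        simp [hch]
      rw [hz, hcast, ih (pre ++ [ch]) h']
      simp [bcP, hch]

-- outer loop of A: counts a·b·c triples in the suffix
theorem Li (l : List Char) : ∀ (suf pre : List Char), l = pre ++ suf → ∀ c0 : Int,
    (PySem.List.pyRange (pre.length : Int) (l.length : Int) 1).foldl
      (fun c i => (PySem.List.pyRange (i + 1) (l.length : Int) 1).foldl
        (fun c j => (PySem.List.pyRange (j + 1) (l.length : Int) 1).foldl
          (fun c k => if PySem.List.pyGet? l i = some 'a' ∧ PySem.List.pyGet? l j = some 'b' ∧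
            PySem.List.pyGet? l k = some 'c' then c + 1 else c) c) c) c0
    = c0 + abcT suf := by
  intro suf
  induction suf with
  | nil =>
    intro pre h c0
    subst h
    simp [PySem.List.pyRange_one_eq_nil, abcT]
  | cons ch t ih =>
    intro pre h c0
    have hlen : l.length = pre.length + (t.length + 1) := by
      subst h; simp [List.length_append]
    rw [PySem.List.pyRange_one_cons (by exact_mod_cast (by omega : pre.length < l.length))]
    simp only [List.foldl_cons]
    have hg : PySem.List.pyGet? l (pre.length : Int) = some ch := by
      rw [h]; exact PySem.List.pyGet?_append_length pre t ch
    have h' : l = (pre ++ [ch]) ++ t := by simp [h]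
    have hcast : ((pre.length : Int) + 1) = ((pre ++ [ch]).length : Int) := by simp
    rw [hg]
    by_cases hch : ch = 'a'
    · simp only [hch, true_and]
      rw [hcast, Lj l t (pre ++ [ch]) h', ih (pre ++ [ch]) h']
      simp [abcT]
      ring
    · have hz : ∀ c : Int, (PySem.List.pyRange ((pre.length : Int) + 1) (l.length : Int) 1).foldl
        (fun c j => (PySem.List.pyRange (j + 1) (l.length : Int) 1).foldl
          (fun c k => if some ch = some 'a' ∧ PySem.List.pyGet? l j = some 'b' ∧
            PySem.List.pyGet? l k = some 'c' then c + 1 else c) c) c = c := by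
        intro c
        refine (PySem.List.foldl_congr_mem _ _ (fun c _ => c) c ?_).trans (List.foldl_fixed _)
        intro acc x _
        refine (PySem.List.foldl_congr_mem _ _ (fun c _ => c) acc ?_).trans (List.foldl_fixed _)
        intro acc2 y _
        simp [hch]
      rw [hz, hcast, ih (pre ++ [ch]) h']
      simp [abcT, hch]

-- B's loop invariant
theorem altB_inv (l : List Char) : ∀ a0 ab0 abc0 : Int,
    l.foldl (fun (st : Int × Int × Int) ch =>
      if ch = 'a' then (st.1 + 1, st.2.1, st.2.2)
      else if ch = 'b' then (st.1, st.2.1 + st.1, st.2.2)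
      else if ch = 'c' then (st.1, st.2.1, st.2.2 + st.2.1)
      else st) (a0, ab0, abc0)
    = (a0 + cntA l, ab0 + a0 * cntB l + abP l, abc0 + ab0 * cntC l + a0 * bcP l + abcT l) := by
  induction l with
  | nil => intro a0 ab0 abc0; simp [cntA, cntB, cntC, abP, bcP, abcT]
  | cons ch t ih =>
    intro a0 ab0 abc0
    simp only [List.foldl_cons]
    by_cases h1 : ch = 'a'
    · simp only [h1, ih]
      simp [cntA, cntB, cntC, abP, bcP, abcT]
      and_intros <;> ring
    · by_cases h2 : ch = 'b'
      · simp only [h2, if_neg (by decide : ¬('b' = 'a')), ih]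
        simp [cntA, cntB, cntC, abP, bcP, abcT]
        and_intros <;> ring
      · by_cases h3 : ch = 'c'
        · simp only [h3, if_neg (by decide : ¬('c' = 'a')), if_neg (by decide : ¬('c' = 'b')), ih]
          simp [cntA, cntB, cntC, abP, bcP, abcT]
          ring
        · simp only [if_neg h1, if_neg h2, if_neg h3, ih]
          simp [cntA, cntB, cntC, abP, bcP, abcT, h1, h2, h3]

-- ===== VERDICT (by name: the statement is the Claim_ definition above) =====
theorem count_abc_substrings_spec : Claim_equal_count_abc_substrings := by
  intro s _
  unfold Spec_count_abc_substrings count_abc_substrings count_abc_substrings_alt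
  rw [altB_inv]
  have hA := Li s.toList s.toList [] (by simp) 0
  simp only [List.length_nil, Nat.cast_zero] at hA
  simp only [PySem.Str.len_eq, PySem.Str.pyGet?_eq, PySem.Chars.pyGet?_eq_listPyGet?]
  rw [show ((0:Int) + 0 * cntC s.toList + 0 * bcP s.toList + abcT s.toList) = abcT s.toList by ring]
  simpa using hA
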